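-- pv_equiv track=rewrite | github.com/brock-fisher25/Advent_of_code | 2015/python/Day_5/Day_5.py | check_good
-- ===== SOURCE A (Python) =====
-- def initiate_vowels():
--     vowels = {
--         'a': 0,
--         'e': 0,
--         'i': 0,
--         'o': 0,
--         'u': 0
--     }
--     return vowels
--
-- def check_good(s):
--     vowels = initiate_vowels()
--     prev_letter = ''
--     two_in_row = False
-- # count # of vowels in string & letters appearing twice in a row
--     for i in s:
--         if i in vowels.keys():
--             vowels[i] += 1
--         if prev_letter == i:
--             two_in_row = True
--         prev_letter = i
--     if two_in_row and sum(vowels.values()) > 2: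
--         return True
--     return False
-- ===== SOURCE B (Python) =====
-- def check_good(s):
--     # a doubled letter exists iff some character's doubled substring occurs in s
--     has_double = any(ch + ch in s for ch in set(s))
--     # vowel total = length minus the non-vowel part
--     consonants = [c for c in s if c not in 'aeiou']
--     return has_double and len(s) - len(consonants) > 2
-- ===== Notes on version B (the rewrite author's own statement) =====
-- stated objective: alternative
-- what changed: Detects the doubled letter by substring search: any(ch+ch in s) over the distinct characters set(s), and counts vowels as len(s) minus the length of the non-vowel filtration, replacing A's single fused scan with a vowel-count dict and prev_letter/two_in_row accumulators.
import Mathlib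
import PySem

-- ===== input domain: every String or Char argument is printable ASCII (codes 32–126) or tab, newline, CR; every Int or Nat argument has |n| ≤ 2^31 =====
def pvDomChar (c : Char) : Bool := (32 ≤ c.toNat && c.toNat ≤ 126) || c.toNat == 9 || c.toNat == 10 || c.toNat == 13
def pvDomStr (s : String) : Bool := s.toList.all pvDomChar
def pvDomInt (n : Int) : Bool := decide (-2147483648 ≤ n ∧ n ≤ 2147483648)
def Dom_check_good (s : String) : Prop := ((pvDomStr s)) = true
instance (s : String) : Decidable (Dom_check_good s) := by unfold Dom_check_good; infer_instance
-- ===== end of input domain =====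

-- B replaces A's single fused scan (vowel-count dict + prev_letter/two_in_row accumulators) by a
-- substring search 'ch+ch in s' over the distinct characters set(s) and a complement count of
-- non-vowels. Objective: alternative decomposition, same result.

-- ===== PORT A =====
def initiate_vowels : PySem.Dict Char Int :=
  PySem.Dict.ofList [('a', 0), ('e', 0), ('i', 0), ('o', 0), ('u', 0)]

def check_good (s : String) : Bool :=
  -- prev_letter starts as '' which equals no single character: ported as Option Char, none initially
  let st := s.toList.foldl
    (fun st c =>
      let d := if st.1.contains c then st.1.modify c 0 (· + 1) else st.1
      (d, (some c, st.2.2 || (st.2.1 == some c))))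
    (initiate_vowels, ((none : Option Char), false))
  if st.2.2 && decide (st.1.values.sum > 2) then true else false

-- ===== PORT B =====
def check_good_alt (s : String) : Bool :=
  let cs := s.toList
  -- any(ch + ch in s for ch in set(s)) — any over a set is order-independent
  let has_double := (PySem.Set.ofList cs).any (fun c => PySem.Chars.isIn [c, c] cs)
  -- consonants = [c for c in s if c not in 'aeiou']
  let consonants := cs.filter (fun c => !("aeiou".toList.contains c))
  has_double && decide ((cs.length : Int) - (consonants.length : Int) > 2)

-- ===== PRECONDITION & SPEC =====
def Spec_check_good (s : String) (out : Bool) : Prop := out = check_good_alt s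
instance (s : String) (out : Bool) : Decidable (Spec_check_good s out) := by unfold Spec_check_good; infer_instance

-- ===== CLAIM (what is proved, stated in full; the proofs are below) =====
def Claim_equal_check_good : Prop := ∀ (s : String), Dom_check_good s → Spec_check_good s (check_good s)

-- ===== LEMMAS AND PROOFS =====

/-- The literal five-key vowel dict with the given counts. -/
def Dmk (a e i o u : Int) : PySem.Dict Char Int :=
  PySem.Dict.mk [('a', a), ('e', e), ('i', i), ('o', o), ('u', u)]

/-- Recursive form of A's two_in_row accumulator. -/
def adjTwo : Option Char → List Char → Bool
  | _, [] => false
  | prev, c :: t => (prev == some c) || adjTwo (some c) t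

lemma dmk_contains_false (a e i o u : Int) (c : Char) (h : c ∉ ['a','e','i','o','u']) :
    (Dmk a e i o u).contains c = false := by
  simp [Dmk, PySem.Dict.contains]; simp_all [eq_comm]

lemma dmk_step (a e i o u : Int) (c : Char) :
    (if (Dmk a e i o u).contains c then (Dmk a e i o u).modify c 0 (· + 1) else Dmk a e i o u)
      = Dmk (a + if c = 'a' then 1 else 0) (e + if c = 'e' then 1 else 0)
            (i + if c = 'i' then 1 else 0) (o + if c = 'o' then 1 else 0)
            (u + if c = 'u' then 1 else 0) := by
  by_cases hc : c ∈ ['a','e','i','o','u']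
  · simp only [List.mem_cons, List.not_mem_nil, or_false] at hc
    rcases hc with h | h | h | h | h <;> subst h <;>
      simp [Dmk, PySem.Dict.contains, PySem.Dict.modify, PySem.Dict.getD, PySem.Dict.get?,
        PySem.Dict.insert]
  · rw [dmk_contains_false a e i o u c hc]
    simp only [List.mem_cons, List.not_mem_nil, or_false, not_or] at hc
    obtain ⟨h1, h2, h3, h4, h5⟩ := hc
    simp [Dmk, h1, h2, h3, h4, h5]

/-- A's dict loop counts each vowel. -/
lemma dict_loop (l : List Char) : ∀ (a e i o u : Int),
    l.foldl (fun d c => if d.contains c then d.modify c 0 (· + 1) else d) (Dmk a e i o u)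
      = Dmk (a + l.count 'a') (e + l.count 'e') (i + l.count 'i') (o + l.count 'o') (u + l.count 'u') := by
  induction l with
  | nil => intro a e i o u; simp
  | cons c t ih =>
    intro a e i o u
    simp only [List.foldl_cons, dmk_step, ih, List.count_cons]
    simp only [Dmk, PySem.Dict.mk.injEq, List.cons.injEq, Prod.mk.injEq]
    and_intros <;> first
      | rfl | trivial
      | (push_cast; split_ifs <;> simp_all <;> omega)

/-- A's prev/two loop computes adjTwo. -/
lemma pt_loop (l : List Char) : ∀ (prev : Option Char) (two : Bool),
    (l.foldl (fun st c => ((some c : Option Char), st.2 || (st.1 == some c))) (prev, two)).2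
      = (two || adjTwo prev l) := by
  induction l with
  | nil => intro prev two; simp [adjTwo]
  | cons c t ih =>
    intro prev two
    simp only [List.foldl_cons, ih, adjTwo, Bool.or_assoc]

/-- A's two_in_row holds iff some doubled character occurs as a substring. -/
lemma adj_iff_infix (l : List Char) :
    adjTwo none l = true ↔ ∃ c, [c, c] <:+: l := by
  induction l with
  | nil =>
    constructor
    · intro h; simp [adjTwo] at h
    · rintro ⟨c, h⟩; have := h.length_le; simp at this
  | cons a t ih =>
    cases t with
    | nil =>
      constructor
      · intro h; simp [adjTwo] at h
      · rintro ⟨c, h⟩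
        have := h.length_le; simp at this
    | cons b t' =>
      have hstep : adjTwo none (a :: b :: t') = ((a == b) || adjTwo none (b :: t')) := by
        simp [adjTwo]
      rw [hstep]
      constructor
      · intro h
        rcases Bool.or_eq_true_iff.mp h with h | h
        · exact ⟨a, [], t', by simp [(beq_iff_eq).mp h]⟩
        · obtain ⟨c, hc⟩ := ih.mp h
          exact ⟨c, List.infix_cons hc⟩
      · rintro ⟨c, hc⟩
        rcases (List.infix_cons_iff).mp hc with hp | hi
        · obtain ⟨r, hr⟩ := hp
          have : a = c ∧ b = c := by
            cases hr; exact ⟨rfl, rfl⟩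
          simp [this.1, this.2]
        · exact Bool.or_eq_true_iff.mpr (Or.inr (ih.mpr ⟨c, hi⟩))

/-- countP over the five vowels equals the sum of the five counts (as Int). -/
lemma countP_vowels (l : List Char) :
    ((l.countP (fun c => (['a','e','i','o','u'] : List Char).contains c) : Nat) : Int)
      = (l.count 'a' : Int) + l.count 'e' + l.count 'i' + l.count 'o' + l.count 'u' := by
  induction l with
  | nil => simp
  | cons c t ih =>
    simp only [List.countP_cons, List.count_cons]
    push_cast
    rw [ih]
    by_cases hc : c ∈ ['a','e','i','o','u']
    · simp only [List.mem_cons, List.not_mem_nil, or_false] at hc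
      rcases hc with h | h | h | h | h <;> subst h <;> (split_ifs <;> simp_all <;> omega)
    · simp only [List.mem_cons, List.not_mem_nil, or_false, not_or] at hc
      obtain ⟨h1, h2, h3, h4, h5⟩ := hc
      simp [h1, h2, h3, h4, h5]

/-- Complement split of countP. -/
lemma countP_not_split (l : List Char) (p : Char → Bool) :
    l.countP (fun c => !p c) + l.countP p = l.length := by
  induction l with
  | nil => simp
  | cons c t ih =>
    simp only [List.countP_cons, List.length_cons]
    by_cases h : p c <;> simp [h] <;> omega

/-- B's set-of-doubled-substrings test equals A's adjacency accumulator. -/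
lemma set_any_eq_adj (l : List Char) :
    (PySem.Set.ofList l).any (fun c => PySem.Chars.isIn [c, c] l) = adjTwo none l := by
  rcases h : adjTwo none l with _ | _
  · rw [List.any_eq_false]
    intro c hc
    rw [Bool.not_eq_true, PySem.Chars.isIn_eq_false_iff]
    intro hinf
    exact absurd ((adj_iff_infix l).mpr ⟨c, hinf⟩) (by simp [h])
  · obtain ⟨c, hc⟩ := (adj_iff_infix l).mp h
    rw [List.any_eq_true]
    refine ⟨c, ?_, (PySem.Chars.isIn_iff_infix _ _).mpr hc⟩
    have hm : c ∈ l := hc.subset (by simp)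
    exact (PySem.Set.mem_ofList l c).mpr hm

-- ===== VERDICT (by name: the statement is the Claim_ definition above) =====
theorem check_good_spec : Claim_equal_check_good := by
  intro s _
  show check_good s = check_good_alt s
  simp only [check_good, check_good_alt]
  rw [show initiate_vowels = Dmk 0 0 0 0 0 from by decide]
  rw [PySem.List.foldl_prod_mk
      (f := fun d c => if PySem.Dict.contains d c then d.modify c 0 (· + 1) else d)
      (g := fun (st : Option Char × Bool) c => ((some c : Option Char), st.2 || (st.1 == some c)))]
  simp only [dict_loop, pt_loop, set_any_eq_adj, Bool.false_or, zero_add]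
  have hsum : ∀ x1 x2 x3 x4 x5 : Int, (Dmk x1 x2 x3 x4 x5).values.sum = x1 + x2 + x3 + x4 + x5 := by
    intro x1 x2 x3 x4 x5; simp [Dmk, PySem.Dict.values]; ring
  rw [hsum]
  have hlen : (s.toList.filter (fun c => !("aeiou".toList.contains c))).length
      = s.toList.countP (fun c => !("aeiou".toList.contains c)) :=
    Eq.symm List.countP_eq_length_filter
  have hsplit := countP_not_split s.toList (fun c => ("aeiou".toList.contains c))
  have hcnt := countP_vowels s.toList
  have heq : ((s.toList.length : Int) - ((s.toList.filter (fun c => !("aeiou".toList.contains c))).length : Int))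
      = (s.toList.count 'a' : Int) + s.toList.count 'e' + s.toList.count 'i' + s.toList.count 'o' + s.toList.count 'u' := by
    rw [hlen, ← hcnt]
    have : (fun c => ("aeiou".toList.contains c)) = (fun c => (['a','e','i','o','u'] : List Char).contains c) := rfl
    rw [← this]
    omega
  rw [heq]
  split
  · exact Eq.symm ‹_›
  · exact (Eq.symm (Bool.not_eq_true _ ▸ ‹_›))
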